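-- pv_equiv track=rewrite | github.com/TIMHX/DSC-20---Prgrmng-DataStruc-for-Data-Sc---Archive | Lab/lab02.py | pass_num
-- ===== SOURCE A (Python) =====
-- def pass_num(input):
--     """
--     Return the number of times 'pass' occurs.
--     Stop calculating when you reach a 'stop'.
--     >>> pass_num("passpass")
--     2
--     >>> pass_num("passpasspasspasspassstop")
--     5
--     >>> pass_num("passtopass")
--     1
--     >>> pass_num("stoppasspass")
--     0
--     >>> pass_num("marinaspasport")
--     0
--     """
--     # YOUR CODE IS HERE
--     filter = []
--     count = 0
--     for i in range(len(input)):
--         if i + 4 > len(input):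
--             break
--         filter = input[i:i + 4]
--         if filter == "pass":
--             count += 1
--         elif filter == "stop":
--             break
--     return count
-- ===== SOURCE B (Python) =====
-- def pass_num(input):
--     s = input.find('stop')
--     if s == -1:
--         s = len(input)
--     count = 0
--     idx = input.find('pass')
--     while idx != -1 and idx < s:
--         count += 1
--         idx = input.find('pass', idx + 1)
--     return count
-- ===== Notes on version B (the rewrite author's own statement) =====
-- stated objective: faster
-- what changed: Replaced the per-index 4-character window comparison over every position with library substring search: locate the stop marker once with str.find, then count the target windows by jumping from match to match with find(sub, idx+1).
import Mathlib
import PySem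

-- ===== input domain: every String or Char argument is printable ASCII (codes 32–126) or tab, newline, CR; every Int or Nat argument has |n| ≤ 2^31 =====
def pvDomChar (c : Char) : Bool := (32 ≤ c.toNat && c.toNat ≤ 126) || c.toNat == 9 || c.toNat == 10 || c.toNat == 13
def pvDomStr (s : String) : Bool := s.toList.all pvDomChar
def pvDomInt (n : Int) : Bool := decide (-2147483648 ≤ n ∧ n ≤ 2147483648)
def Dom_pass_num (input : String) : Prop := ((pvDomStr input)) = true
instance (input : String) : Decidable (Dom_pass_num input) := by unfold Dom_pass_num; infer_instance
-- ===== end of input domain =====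

-- B replaces A's per-index 4-char window scan by substring search: find the stop marker once,
-- then jump between matches with find(sub, idx+1) — same O(n), measurably faster constants.

-- ===== PORT A =====
-- A's for-loop over all indices, with its two breaks, as index recursion
def passNumLoopA (cs : List Char) (i : Nat) (count : Int) : Int :=
  if i < cs.length then
    if cs.length < i + 4 then count
    else
      let filter := PySem.List.slice cs (some (i : Int)) (some ((i : Int) + 4))
      if filter = "pass".toList then passNumLoopA cs (i + 1) (count + 1)
      else if filter = "stop".toList then count
      else passNumLoopA cs (i + 1) count
  else count
termination_by cs.length - i

def pass_num (input : String) : Int := passNumLoopA input.toList 0 0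

-- ===== PORT B =====
-- B's while-loop: fuel only makes the recursion structural (each find jumps strictly forward,
-- so cs.length + 1 steps always suffice)
def passNumLoopB (cs : List Char) (s idx count : Int) (fuel : Nat) : Int :=
  match fuel with
  | 0 => count
  | fuel + 1 =>
    if idx ≠ -1 ∧ idx < s then
      passNumLoopB cs s (PySem.Chars.findFrom cs "pass".toList (idx + 1) none) (count + 1) fuel
    else count

def pass_num_alt (input : String) : Int :=
  let cs := input.toList
  let s0 := PySem.Chars.find cs "stop".toList
  let s : Int := if s0 = -1 then (cs.length : Int) else s0
  passNumLoopB cs s (PySem.Chars.find cs "pass".toList) 0 (cs.length + 1)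

-- ===== PRECONDITION & SPEC =====
def Spec_pass_num (input : String) (out : Int) : Prop := out = pass_num_alt input
instance (input : String) (out : Int) : Decidable (Spec_pass_num input out) := by unfold Spec_pass_num; infer_instance

-- ===== CLAIM (what is proved, stated in full; the proofs are below) =====
def Claim_equal_pass_num : Prop := ∀ (input : String), Dom_pass_num input → Spec_pass_num input (pass_num input)

-- ===== LEMMAS AND PROOFS =====

-- number of 'pass' occurrences starting at a position in [k, s)
def pvOcc (cs : List Char) (j : Nat) : Bool := "pass".toList.isPrefixOf (cs.drop j)

def pvCnt (cs : List Char) (k s : Nat) : Nat :=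
  (List.range' k (cs.length - k)).countP (fun j => decide (j < s) && pvOcc cs j)

lemma pvOcc_iff (cs : List Char) (j : Nat) :
    pvOcc cs j = true ↔ "pass".toList <+: cs.drop j := by
  simp [pvOcc, List.isPrefixOf_iff_prefix]

lemma pvCnt_top (cs : List Char) (k s : Nat) (h : cs.length ≤ k) : pvCnt cs k s = 0 := by
  unfold pvCnt
  have : cs.length - k = 0 := by omega
  simp [this]

lemma pvCnt_succ (cs : List Char) (k s : Nat) (h : k < cs.length) :
    pvCnt cs k s = (if k < s ∧ pvOcc cs k then 1 else 0) + pvCnt cs (k + 1) s := by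
  unfold pvCnt
  have h1 : cs.length - k = (cs.length - (k + 1)) + 1 := by omega
  rw [h1, List.range'_succ, List.countP_cons]
  by_cases hk : k < s ∧ pvOcc cs k = true
  · simp [hk.1, hk.2]; omega
  · have : (decide (k < s) && pvOcc cs k) = false := by
      rcases Decidable.em (k < s) with h2 | h2
      · simp [h2]; by_contra hc
        exact hk ⟨h2, by revert hc; cases pvOcc cs k <;> simp⟩
      · simp [h2]
    simp [this, hk]

lemma pvCnt_zero_of (cs : List Char) (k s : Nat)
    (h : ∀ j, k ≤ j → j < s → pvOcc cs j = false) : pvCnt cs k s = 0 := by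
  unfold pvCnt
  apply List.countP_eq_zero.mpr
  intro j hj
  have hmem := List.mem_range'_1.mp hj
  rcases Decidable.em (j < s) with h2 | h2
  · simp [h j (by omega) h2]
  · simp [h2]

lemma pvCnt_eq_of_none (cs : List Char) (s : Nat) :
    ∀ m k, k ≤ m → (∀ j, k ≤ j → j < m → pvOcc cs j = false) →
      pvCnt cs k s = pvCnt cs m s := by
  intro m
  induction m with
  | zero =>
    intro k hk _
    have h0 : k = 0 := Nat.le_zero.mp hk
    subst h0
    rfl
  | succ m ih =>
    intro k hk hnone
    rcases Decidable.em (k = m + 1) with he | he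
    · simp [he]
    · have hkm : k ≤ m := by omega
      have h1 : pvCnt cs k s = pvCnt cs m s :=
        ih k hkm (fun j hj1 hj2 => hnone j hj1 (by omega))
      rcases Decidable.em (m < cs.length) with hm | hm
      · rw [h1, pvCnt_succ cs m s hm, hnone m hkm (by omega)]
        simp
      · rw [h1, pvCnt_top cs m s (by omega), pvCnt_top cs (m + 1) s (by omega)]

lemma pass_prefix_len (cs : List Char) (j : Nat) (h : "pass".toList <+: cs.drop j) :
    j + 4 ≤ cs.length := by
  have := h.length_le
  simp at this
  omega

-- A's loop counts the 'pass' windows before position S, the first 'stop' window (or the end)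
lemma loopA_eq (cs : List Char) (S : Nat)
    (hmin : ∀ j, j < S → ¬ ("stop".toList <+: cs.drop j))
    (hS : S = cs.length ∨ "stop".toList <+: cs.drop S) :
    ∀ d i, cs.length - i ≤ d → i ≤ S → ∀ count,
      passNumLoopA cs i count = count + (pvCnt cs i S : Int) := by
  intro d
  induction d with
  | zero =>
    intro i hd hiS count
    have hn : cs.length ≤ i := by omega
    rw [passNumLoopA]
    simp only [if_neg (by omega : ¬ i < cs.length)]
    rw [pvCnt_top cs i S hn]; simp
  | succ d ih =>
    intro i hd hiS count
    rw [passNumLoopA]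
    rcases Decidable.em (i < cs.length) with hi | hi
    · rw [if_pos hi]
      rcases Decidable.em (cs.length < i + 4) with hshort | hshort
      · rw [if_pos hshort]
        have : pvCnt cs i S = 0 := by
          apply pvCnt_zero_of
          intro j hj _
          by_contra hc
          have hp := (pvOcc_iff cs j).mp (by revert hc; cases pvOcc cs j <;> simp)
          have := pass_prefix_len cs j hp
          omega
        rw [this]; simp
      · rw [if_neg hshort]
        have hcast : ((i : Int) + 4) = (((i + 4 : Nat)) : Int) := by push_cast; ring
        have hslice : PySem.List.slice cs (some (i : Int)) (some ((i : Int) + 4))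
            = (cs.drop i).take 4 := by
          rw [hcast, PySem.List.slice_natCast]
          congr 1
          omega
        rcases Decidable.em ((cs.drop i).take 4 = "pass".toList) with hpassw | hpassw
        · rw [hslice, if_pos hpassw]
          have hocc : pvOcc cs i = true := by
            rw [pvOcc_iff]
            exact hpassw ▸ List.take_prefix 4 (cs.drop i)
          have hiltS : i < S := by
            rcases Nat.lt_or_ge i S with h | h
            · exact h
            · exfalso
              have hiS' : i = S := by omega
              rcases hS with h1 | h1
              · omega
              · have := List.prefix_iff_eq_take.mp h1
                simp at this
                rw [← hiS'] at this
                rw [← this] at hpassw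
                simp at hpassw
          rw [ih (i + 1) (by omega) (by omega) (count + 1)]
          rw [pvCnt_succ cs i S hi, if_pos ⟨hiltS, hocc⟩]
          push_cast; ring
        · rw [hslice, if_neg hpassw]
          rcases Decidable.em ((cs.drop i).take 4 = "stop".toList) with hstopw | hstopw
          · rw [if_pos hstopw]
            have hstop : "stop".toList <+: cs.drop i :=
              hstopw ▸ List.take_prefix 4 (cs.drop i)
            have hiS' : i = S := by
              rcases Nat.lt_or_ge i S with h | h
              · exact absurd hstop (hmin i h)
              · omega
            have : pvCnt cs i S = 0 :=
              pvCnt_zero_of cs i S (fun j hj1 hj2 => by omega)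
            rw [this]; simp
          · rw [if_neg hstopw]
            have hocc : pvOcc cs i = false := by
              by_contra hc
              have hp := (pvOcc_iff cs i).mp (by revert hc; cases pvOcc cs i <;> simp)
              have := List.prefix_iff_eq_take.mp hp
              simp at this
              exact hpassw this.symm
            have hiltS : i < S := by
              rcases Nat.lt_or_ge i S with h | h
              · exact h
              · exfalso
                have hiS' : i = S := by omega
                rcases hS with h1 | h1
                · omega
                · have := List.prefix_iff_eq_take.mp h1
                  simp at this
                  rw [← hiS'] at this
                  exact hstopw this.symm
            rw [ih (i + 1) (by omega) (by omega) count]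
            rw [pvCnt_succ cs i S hi, if_neg (by simp [hocc])]
            simp
    · rw [if_neg hi]
      rw [pvCnt_top cs i S (by omega)]; simp

lemma occ_of_prefix_drop (cs : List Char) (k j : Nat) (hk : k ≤ j)
    (h : "pass".toList <+: cs.drop j) : "pass".toList <:+: cs.drop k := by
  have hdd : cs.drop j = (cs.drop k).drop (j - k) := by
    rw [List.drop_drop]; congr 1; omega
  exact List.infix_iff_prefix_suffix.mpr
    ⟨(cs.drop k).drop (j - k), hdd ▸ h, List.drop_suffix _ _⟩

-- B's loop, started at the first 'pass' at or after k, counts the 'pass' windows in [k, S)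
lemma loopB_eq (cs : List Char) (S : Nat) :
    ∀ fuel k count, k ≤ cs.length → cs.length + 1 - k ≤ fuel →
      passNumLoopB cs (S : Int) (PySem.Chars.findFrom cs "pass".toList ((k : Nat) : Int) none)
          count fuel
        = count + (pvCnt cs k S : Int) := by
  intro fuel
  induction fuel with
  | zero => intro k count hk hf; omega
  | succ fuel ih =>
    intro k count hk hf
    rcases Decidable.em (PySem.Chars.findFrom cs "pass".toList ((k : Nat) : Int) none = -1)
      with hr | hr
    · rw [passNumLoopB, if_neg (by intro h; exact h.1 hr)]
      have hnone : ¬ ("pass".toList <:+: cs.drop k) :=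
        (PySem.Chars.findFrom_natCast_eq_neg_one_iff cs "pass".toList k hk).mp hr
      have : pvCnt cs k S = 0 := by
        apply pvCnt_zero_of
        intro j hj _
        by_contra hc
        have hp := (pvOcc_iff cs j).mp (by revert hc; cases pvOcc cs j <;> simp)
        exact hnone (occ_of_prefix_drop cs k j hj hp)
      rw [this]; simp
    · obtain ⟨hkr, hpre, hminr⟩ :=
        PySem.Chars.findFrom_natCast_spec cs "pass".toList k hk hr
      set r := PySem.Chars.findFrom cs "pass".toList ((k : Nat) : Int) none with hrdef
      have hr0 : 0 ≤ r := le_trans (by exact_mod_cast Nat.zero_le k) hkr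
      have hrm : r = ((r.toNat : Nat) : Int) := by omega
      have hkm : k ≤ r.toNat := by omega
      have hm4 : r.toNat + 4 ≤ cs.length := pass_prefix_len cs r.toNat hpre
      rcases Decidable.em (r < (S : Int)) with hrs | hrs
      · rw [passNumLoopB, if_pos ⟨by omega, hrs⟩]
        have hstep : r + 1 = (((r.toNat + 1 : Nat)) : Int) := by omega
        rw [hstep, ih (r.toNat + 1) (count + 1) (by omega) (by omega)]
        have hmS : r.toNat < S := by omega
        have h1 : pvCnt cs k S = pvCnt cs r.toNat S := by
          apply pvCnt_eq_of_none cs S r.toNat k hkm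
          intro j hj1 hj2
          by_contra hc
          have hp := (pvOcc_iff cs j).mp (by revert hc; cases pvOcc cs j <;> simp)
          exact hminr j hj1 hj2 hp
        have hocc : pvOcc cs r.toNat = true := (pvOcc_iff cs r.toNat).mpr hpre
        rw [h1, pvCnt_succ cs r.toNat S (by omega), if_pos ⟨hmS, hocc⟩]
        push_cast; ring
      · rw [passNumLoopB, if_neg (by intro h; exact hrs h.2)]
        have hSm : S ≤ r.toNat := by omega
        have : pvCnt cs k S = 0 := by
          apply pvCnt_zero_of
          intro j hj1 hj2
          by_contra hc
          have hp := (pvOcc_iff cs j).mp (by revert hc; cases pvOcc cs j <;> simp)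
          exact hminr j hj1 (by omega) hp
        rw [this]; simp

-- ===== VERDICT (by name: the statement is the Claim_ definition above) =====
theorem pass_num_spec : Claim_equal_pass_num := by
  intro input _
  unfold Spec_pass_num pass_num pass_num_alt
  set cs := input.toList with hcs
  -- the stop boundary S, as a Nat, with its characterisation
  rcases Decidable.em (PySem.Chars.find cs "stop".toList = -1) with hf | hf
  · -- no 'stop': S = cs.length
    have hnost : ¬ ("stop".toList <:+: cs) :=
      (PySem.Chars.find_eq_neg_one_iff cs "stop".toList).mp hf
    have hmin : ∀ j, j < cs.length → ¬ ("stop".toList <+: cs.drop j) := by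
      intro j _ hp
      exact hnost (List.infix_iff_prefix_suffix.mpr ⟨cs.drop j, hp, List.drop_suffix _ _⟩)
    have hA := loopA_eq cs cs.length hmin (Or.inl rfl)
      (cs.length) 0 (by omega) (by omega) 0
    have hfind0 : PySem.Chars.find cs "pass".toList
        = PySem.Chars.findFrom cs "pass".toList (((0 : Nat)) : Int) none := by
      rw [Nat.cast_zero, PySem.Chars.findFrom_zero]
    have hB := loopB_eq cs cs.length (cs.length + 1) 0 0 (by omega) (by omega)
    simp only [if_pos hf]
    rw [hfind0, hB, hA]
  · -- there is a 'stop': S = its first index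
    have hff : PySem.Chars.findFrom cs "stop".toList (((0 : Nat)) : Int) none
        = PySem.Chars.find cs "stop".toList := by
      rw [Nat.cast_zero, PySem.Chars.findFrom_zero]
    obtain ⟨hkr, hpre, hminr⟩ :=
      PySem.Chars.findFrom_natCast_spec cs "stop".toList 0 (Nat.zero_le _) (by rw [hff]; exact hf)
    rw [hff] at hkr hpre hminr
    have hkr' : (0 : Int) ≤ PySem.Chars.find cs "stop".toList := Nat.cast_zero (R := Int) ▸ hkr
    have hminr' : ∀ i : Nat, i < (PySem.Chars.find cs "stop".toList).toNat →
        ¬ ("stop".toList <+: cs.drop i) := fun i hi => hminr i (Nat.zero_le _) hi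
    have hA := loopA_eq cs (PySem.Chars.find cs "stop".toList).toNat hminr' (Or.inr hpre)
      (cs.length) 0 (by omega) (by omega) 0
    have hfind0 : PySem.Chars.find cs "pass".toList
        = PySem.Chars.findFrom cs "pass".toList (((0 : Nat)) : Int) none := by
      rw [Nat.cast_zero, PySem.Chars.findFrom_zero]
    have hB := loopB_eq cs (PySem.Chars.find cs "stop".toList).toNat (cs.length + 1) 0 0
      (by omega) (by omega)
    simp only [if_neg hf]
    have hfc : PySem.Chars.find cs "stop".toList
        = (((PySem.Chars.find cs "stop".toList).toNat : Nat) : Int) :=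
      (Int.toNat_of_nonneg hkr').symm
    rw [hfc, hfind0, hB, hA]
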